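-- pv_equiv track=rewrite | github.com/GeorgePearse/swin_mask_rcnn | scripts/evaluate_validation.py | coco_format_to_dict
-- ===== SOURCE A (Python) =====
-- from typing import List, Dict, Any
--
-- def coco_format_to_dict(coco_results: List[Dict[str, Any]]) -> Dict[int, List[Dict[str, Any]]]:
--     """Convert COCO format results to dictionary grouped by image_id."""
--     predictions_by_image = {}
--
--     for result in coco_results:
--         image_id = result['image_id']
--         if image_id not in predictions_by_image:
--             predictions_by_image[image_id] = []
--         predictions_by_image[image_id].append(result)
--
--     return predictions_by_image
-- ===== SOURCE B (Python) =====
-- def coco_format_to_dict(coco_results):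
--     """Convert COCO format results to dictionary grouped by image_id."""
--     ids = []
--     for r in coco_results:
--         i = r['image_id']
--         if i not in ids:
--             ids.append(i)
--     return {i: [r for r in coco_results if r['image_id'] == i] for i in ids}
-- ===== Notes on version B (the rewrite author's own statement) =====
-- stated objective: alternative
-- what changed: B first collects the distinct image_ids in order of first occurrence, then builds each group with a filtering comprehension over the whole list, instead of A's single pass that appends into a growing dict of lists.
import Mathlib
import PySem

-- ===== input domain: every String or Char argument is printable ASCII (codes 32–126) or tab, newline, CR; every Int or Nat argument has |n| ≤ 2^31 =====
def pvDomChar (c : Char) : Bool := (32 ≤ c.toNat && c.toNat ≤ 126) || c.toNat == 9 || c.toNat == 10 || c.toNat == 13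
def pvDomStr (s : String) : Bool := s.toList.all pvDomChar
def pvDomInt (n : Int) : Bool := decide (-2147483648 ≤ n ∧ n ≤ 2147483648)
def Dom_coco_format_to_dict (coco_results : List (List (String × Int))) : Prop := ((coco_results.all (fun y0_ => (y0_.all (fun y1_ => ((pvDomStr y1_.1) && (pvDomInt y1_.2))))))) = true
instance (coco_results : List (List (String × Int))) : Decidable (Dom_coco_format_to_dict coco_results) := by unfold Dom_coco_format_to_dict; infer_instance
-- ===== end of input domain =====

-- B groups by collecting the distinct image_ids first and then filtering the input once per id,
-- instead of A's single pass appending into a dict of lists; same return value, no speed claim.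

-- result['image_id']: first-match lookup in the association list (total form; Pre_ guarantees the key exists)
def pvImageId (r : List (String × Int)) : Int :=
  ((r.find? (fun p => p.1 == "image_id")).map (·.2)).getD 0

-- ===== PORT A =====
def coco_format_to_dict (coco_results : List (List (String × Int))) : List (Int × List (List (String × Int))) :=
  (coco_results.foldl
    (fun d r =>
      let image_id := pvImageId r
      let d' := if d.contains image_id then d else d.insert image_id []
      d'.modify image_id [] (fun l => l ++ [r]))
    (PySem.Dict.empty : PySem.Dict Int (List (List (String × Int))))).items

-- ===== PORT B =====
def coco_format_to_dict_alt (coco_results : List (List (String × Int))) : List (Int × List (List (String × Int))) :=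
  let ids := coco_results.foldl (fun s r => PySem.Set.add s (pvImageId r)) ([] : PySem.Set Int)
  ids.map (fun i => (i, coco_results.filter (fun r => pvImageId r == i)))

-- ===== PRECONDITION & SPEC =====
-- Pre_ excludes exactly the inputs where some result lacks the 'image_id' key, on which A raises KeyError.
def Pre_coco_format_to_dict (coco_results : List (List (String × Int))) : Prop :=
  ∀ r ∈ coco_results, "image_id" ∈ r.map Prod.fst
instance (coco_results : List (List (String × Int))) : Decidable (Pre_coco_format_to_dict coco_results) := by unfold Pre_coco_format_to_dict; infer_instance

def pvWitness_coco_format_to_dict : (List (List (String × Int))) :=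
  [[("image_id", 1), ("score", 7)], [("image_id", 2)], [("image_id", 1), ("score", 3)]]

def Spec_coco_format_to_dict (coco_results : List (List (String × Int))) (out : List (Int × List (List (String × Int)))) : Prop := out = coco_format_to_dict_alt coco_results
instance (coco_results : List (List (String × Int))) (out : List (Int × List (List (String × Int)))) : Decidable (Spec_coco_format_to_dict coco_results out) := by unfold Spec_coco_format_to_dict; infer_instance

-- ===== CLAIM (what is proved, stated in full; the proofs are below) =====
def Claim_equal_coco_format_to_dict : Prop := ∀ (coco_results : List (List (String × Int))), Dom_coco_format_to_dict coco_results → Pre_coco_format_to_dict coco_results → Spec_coco_format_to_dict coco_results (coco_format_to_dict coco_results)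

-- ===== LEMMAS AND PROOFS =====

-- A's two-step 'setdefault then append' equals a single modify, pointwise.
lemma stepA_eq_modify (d : PySem.Dict Int (List (List (String × Int)))) (r : List (String × Int)) :
    (let image_id := pvImageId r
     let d' := if d.contains image_id then d else d.insert image_id []
     d'.modify image_id [] (fun l => l ++ [r]))
    = d.modify (pvImageId r) [] (fun l => l ++ [r]) := by
  by_cases h : d.contains (pvImageId r)
  · simp [h]
  · simp only [h, Bool.false_eq_true, if_false]
    simp only [Bool.not_eq_true] at h
    rw [PySem.Dict.modify, PySem.Dict.modify, PySem.Dict.getD_insert_self,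
        PySem.Dict.insert_insert_self, PySem.Dict.getD_of_not_contains _ _ h]

-- ===== VERDICT (by name: the statement is the Claim_ definition above) =====
theorem coco_format_to_dict_spec : Claim_equal_coco_format_to_dict := by
  intro xs _ _
  show coco_format_to_dict xs = coco_format_to_dict_alt xs
  unfold coco_format_to_dict coco_format_to_dict_alt
  rw [show (fun (d : PySem.Dict Int (List (List (String × Int)))) r =>
      let image_id := pvImageId r
      let d' := if d.contains image_id then d else d.insert image_id []
      d'.modify image_id [] (fun l => l ++ [r]))
    = (fun d r => d.modify (pvImageId r) [] (fun l => l ++ [r])) from funext fun d => funext fun r => stepA_eq_modify d r]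
  rw [← List.foldl_map (f := fun r => ((pvImageId r, r) : Int × List (String × Int)))
      (g := fun d p => PySem.Dict.modify d p.1 [] (fun l => l ++ [p.2]))]
  rw [PySem.Dict.items_eq_map_keys _ (PySem.Dict.nodup_keys_foldl_modify_key _ _ _ _ _ (by simp)) []]
  rw [PySem.Dict.keys_foldl_modify_key]
  rw [← PySem.Set.update_map_eq_foldl_add]
  congr 1
  · funext k
    rw [PySem.Dict.getD_foldl_modify_append]
    simp [PySem.Dict.getD_empty, List.filter_map, List.map_map, Function.comp_def]
  · simp [PySem.Dict.keys_empty, List.map_map, Function.comp_def]
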